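-- pv_equiv track=rewrite | github.com/muumuu8181/ai-stress-test | components/002-template-engine/src/templateengine/engine.py | _split_by_unescaped_word
-- ===== SOURCE A (Python) =====
-- from typing import Any, Dict, List, Optional, Callable, Union, Set
--
-- def _split_by_unescaped_word(text: str, word: str) -> List[str]:
--     """Splits text by word (surrounded by space) if not inside quotes."""
--     parts = []
--     current = []
--     in_quote = None
--     word_spaced = f" {word} "
--
--     i = 0
--     while i < len(text):
--         c = text[i]
--         if c in ('"', "'") and (i == 0 or text[i-1] != '\\'):
--             if in_quote == c:
--                 in_quote = None
--             elif in_quote is None: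
--                 in_quote = c
--
--         if in_quote is None and text.startswith(word_spaced, i):
--             parts.append("".join(current).strip())
--             current = []
--             i += len(word_spaced) - 1 # i will be incremented by 1 later
--         else:
--             current.append(c)
--         i += 1
--
--     parts.append("".join(current).strip())
--     return parts
-- ===== SOURCE B (Python) =====
-- from typing import List
--
-- def _split_by_unescaped_word(text: str, word: str) -> List[str]:
--     """Splits text by word (surrounded by space) if not inside quotes.
--
--     Jumps between candidate occurrences with str.find and cuts slices,
--     instead of accumulating characters one by one; the quote state is
--     brought up to date only as far as each candidate position.
--     """
--     word_spaced = f" {word} "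
--     parts = []
--     seg_start = 0
--     in_quote = None
--     i = 0
--     while True:
--         j = text.find(word_spaced, i)
--         if j == -1:
--             break
--         # advance the quote state over text[i:j]
--         for k in range(i, j):
--             c = text[k]
--             if c in ('"', "'") and (k == 0 or text[k-1] != '\\'):
--                 if in_quote == c:
--                     in_quote = None
--                 elif in_quote is None:
--                     in_quote = c
--         if in_quote is None:
--             parts.append(text[seg_start:j].strip())
--             seg_start = j + len(word_spaced)
--             i = seg_start
--         else:
--             i = j + 1  # text[j] is a space: it cannot toggle the quote state
--     parts.append(text[seg_start:].strip())
--     return parts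
-- ===== Notes on version B (the rewrite author's own statement) =====
-- stated objective: faster
-- what changed: Instead of accumulating characters one by one into a `current` list, B jumps between candidate delimiter occurrences with str.find, advances the quote state only up to each candidate, and cuts the parts out of the text as slices.
import Mathlib
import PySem

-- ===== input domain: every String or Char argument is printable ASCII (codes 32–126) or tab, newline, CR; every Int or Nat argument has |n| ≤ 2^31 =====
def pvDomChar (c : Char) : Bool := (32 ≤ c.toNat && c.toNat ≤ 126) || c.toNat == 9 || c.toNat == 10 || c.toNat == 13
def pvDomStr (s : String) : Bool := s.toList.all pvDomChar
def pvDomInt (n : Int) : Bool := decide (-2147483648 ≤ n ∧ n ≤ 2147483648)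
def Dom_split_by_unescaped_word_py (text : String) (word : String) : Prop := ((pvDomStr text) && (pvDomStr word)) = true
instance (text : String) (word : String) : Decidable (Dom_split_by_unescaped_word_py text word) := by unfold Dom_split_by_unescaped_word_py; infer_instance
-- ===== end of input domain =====

-- B replaces A's char-by-char accumulation with str.find jumps between candidate
-- delimiters and slice cuts (equal return value proved below; no side effects involved).

-- ===== PORT A =====

-- the quote-toggle step both Pythons share verbatim:
-- if c in ('"', "'") and (k == 0 or text[k-1] != '\\'): toggle
-- (getD is exact: both reads are guarded, k < len and k-1 < len)
def pvQuoteStep (t : List Char) (q : Option Char) (k : Nat) : Option Char :=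
  let c := t.getD k ' '
  if (c = '"' ∨ c = '\'') ∧ (k = 0 ∨ t.getD (k-1) ' ' ≠ '\\') then
    if q = some c then none
    else if q = none then some c
    else q
  else q

-- A's while-loop over i with accumulator `current`; word_spaced = ' ' :: word ++ ' '.
-- text.startswith(word_spaced, i) is the prefix test on t.drop i.
def pvAloop (t w : List Char) (i : Nat) (cur : List Char) (parts : List String)
    (q : Option Char) : List String :=
  let ws : List Char := ' ' :: (w ++ [' '])
  if _h : i < t.length then
    let q' := pvQuoteStep t q i
    if q' = none ∧ ws <+: t.drop i then
      pvAloop t w (i + ws.length) [] (parts ++ [String.ofList (PySem.Chars.strip cur)]) q'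
    else
      pvAloop t w (i + 1) (cur ++ [t.getD i ' ']) parts q'
  else
    parts ++ [String.ofList (PySem.Chars.strip cur)]
termination_by t.length - i
decreasing_by
  · simp only [List.length_cons, List.length_append]; omega
  · omega

def split_by_unescaped_word_py (text : String) (word : String) : List String :=
  pvAloop text.toList word.toList 0 [] [] none

-- ===== PORT B =====

-- bound facts about str.find(sub, start), needed for pvBloop's termination
theorem pvFindFrom_none_of_lt (t ws : List Char) (i : Nat) (h : t.length < i) :
    PySem.Chars.findFrom t ws (i : Int) = -1 := by
  simp [PySem.Chars.findFrom]; omega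

theorem pvFindFrom_bounds (t ws : List Char) (i : Nat) (hws : ws ≠ [])
    (h : PySem.Chars.findFrom t ws (i : Int) ≠ -1) :
    i ≤ t.length ∧ i ≤ (PySem.Chars.findFrom t ws (i : Int)).toNat ∧
      (PySem.Chars.findFrom t ws (i : Int)).toNat + ws.length ≤ t.length := by
  have hi : i ≤ t.length := by
    by_contra hc
    exact h (pvFindFrom_none_of_lt t ws i (by omega))
  obtain ⟨h1, h2, h3⟩ := PySem.Chars.findFrom_natCast_spec t ws i hi h
  refine ⟨hi, by omega, ?_⟩
  have hlen := h2.length_le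
  simp only [List.length_drop] at hlen
  have hne : (PySem.Chars.findFrom t ws (i:Int)).toNat ≤ t.length := by
    by_contra hc
    rw [List.drop_eq_nil_of_le (by omega)] at h2
    exact hws (List.prefix_nil.mp h2)
  omega

-- B's while-True loop: jump to the next candidate with str.find, advance the quote
-- state over text[i:j] (the for k in range(i, j) loop is the foldl), then either cut
-- the slice text[seg:j] or step past the candidate.  text[a:b] with 0 ≤ a ≤ b ≤ len
-- is (t.drop a).take (b - a); text[a:] is t.drop a (exact on these in-range bounds).
def pvBloop (t w : List Char) (i seg : Nat) (q : Option Char) (parts : List String) :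
    List String :=
  let ws : List Char := ' ' :: (w ++ [' '])
  let j : Int := PySem.Chars.findFrom t ws (i : Int)
  if hj : j = -1 then
    parts ++ [String.ofList (PySem.Chars.strip (t.drop seg))]
  else
    let jn := j.toNat
    let q' := (List.range' i (jn - i)).foldl (pvQuoteStep t) q
    if q' = none then
      pvBloop t w (jn + ws.length) (jn + ws.length) q'
        (parts ++ [String.ofList (PySem.Chars.strip ((t.drop seg).take (jn - seg)))])
    else
      pvBloop t w (jn + 1) seg q' parts
termination_by t.length + 1 - i
decreasing_by
  · have := pvFindFrom_bounds t (' ' :: (w ++ [' '])) i (by simp) hj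
    simp only [List.length_cons, List.length_append] at *
    omega
  · have := pvFindFrom_bounds t (' ' :: (w ++ [' '])) i (by simp) hj
    simp only [List.length_cons, List.length_append] at *
    omega

def split_by_unescaped_word_py_alt (text : String) (word : String) : List String :=
  pvBloop text.toList word.toList 0 0 none []

-- ===== PRECONDITION & SPEC =====
def Spec_split_by_unescaped_word_py (text : String) (word : String) (out : List String) : Prop := out = split_by_unescaped_word_py_alt text word
instance (text : String) (word : String) (out : List String) : Decidable (Spec_split_by_unescaped_word_py text word out) := by unfold Spec_split_by_unescaped_word_py; infer_instance

-- ===== CLAIM (what is proved, stated in full; the proofs are below) =====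
def Claim_equal_split_by_unescaped_word_py : Prop := ∀ (text : String) (word : String), Dom_split_by_unescaped_word_py text word → Spec_split_by_unescaped_word_py text word (split_by_unescaped_word_py text word)

-- ===== LEMMAS AND PROOFS =====

-- uniqueness: find returns the least match position ≥ start
theorem pvFindFrom_eq_of (t ws : List Char) (i r : Nat) (hi : i ≤ t.length)
    (hr : i ≤ r) (hpre : ws <+: t.drop r)
    (hmin : ∀ k, i ≤ k → k < r → ¬ ws <+: t.drop k) :
    PySem.Chars.findFrom t ws (i : Int) = (r : Int) := by
  have hinf : ws <:+: t.drop i := by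
    have hd : t.drop r = (t.drop i).drop (r - i) := by
      rw [List.drop_drop]; congr 1; omega
    rw [hd] at hpre
    exact hpre.isInfix.trans (List.drop_suffix _ _).isInfix
  have hne : PySem.Chars.findFrom t ws (i : Int) ≠ -1 := by
    rw [Ne, PySem.Chars.findFrom_natCast_eq_neg_one_iff t ws i hi]
    simpa using hinf
  obtain ⟨h1, h2, h3⟩ := PySem.Chars.findFrom_natCast_spec t ws i hi hne
  set j := PySem.Chars.findFrom t ws (i : Int) with hj
  have hj0 : (0:Int) ≤ j := le_trans (by exact_mod_cast Int.ofNat_le.mpr (Nat.zero_le i)) h1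
  have hji : i ≤ j.toNat := by omega
  have hjr : j.toNat = r := by
    rcases lt_trichotomy j.toNat r with hlt | heq | hgt
    · exact absurd h2 (hmin _ hji hlt)
    · exact heq
    · exact absurd hpre (h3 r hr hgt)
  omega

-- no match at i: searching from i and from i+1 agree
theorem pvFindFrom_step (t ws : List Char) (i : Nat) (hi : i < t.length)
    (hno : ¬ ws <+: t.drop i) :
    PySem.Chars.findFrom t ws (i : Int) = PySem.Chars.findFrom t ws ((i + 1 : Nat) : Int) := by
  by_cases h : PySem.Chars.findFrom t ws (i : Int) = -1
  · have hni : ¬ ws <:+: t.drop i :=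
      (PySem.Chars.findFrom_natCast_eq_neg_one_iff t ws i (by omega)).mp h
    rw [h, Eq.comm, PySem.Chars.findFrom_natCast_eq_neg_one_iff t ws (i+1) (by omega)]
    intro hinf
    exact hni (hinf.trans (by
      rw [show t.drop (i+1) = (t.drop i).drop 1 by rw [List.drop_drop]]
      exact (List.drop_suffix _ _).isInfix))
  · obtain ⟨h1, h2, h3⟩ := PySem.Chars.findFrom_natCast_spec t ws i (by omega) h
    set j := PySem.Chars.findFrom t ws (i : Int) with hj
    have hj0 : (0:Int) ≤ j := le_trans (by exact_mod_cast Int.ofNat_le.mpr (Nat.zero_le i)) h1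
    have hji : i ≤ j.toNat := by omega
    have hjne : j.toNat ≠ i := by
      intro hc; rw [hc] at h2; exact hno h2
    have heq := pvFindFrom_eq_of t ws (i+1) j.toNat (by omega) (by omega) h2
      (fun k hk1 hk2 => h3 k (by omega) hk2)
    rw [heq]; omega

-- the char at a matched position is the delimiter's leading space, which never toggles
theorem pvQuoteStep_of_space (t : List Char) (q : Option Char) (k : Nat)
    (hc : t.getD k ' ' = ' ') : pvQuoteStep t q k = q := by
  unfold pvQuoteStep
  rw [hc]
  simp

theorem pvGetD_of_prefix (t w : List Char) (i : Nat)
    (hpre : (' ' :: (w ++ [' '])) <+: t.drop i) : t.getD i ' ' = ' ' := by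
  obtain ⟨s, hs⟩ := hpre
  have h0 : (t.drop i).getD 0 ' ' = ' ' := by rw [← hs]; rfl
  rw [List.getD_eq_getElem?_getD] at h0 ⊢
  rwa [List.getElem?_drop, Nat.add_zero] at h0

-- B absorbs one A-step when A does not split at i
theorem pvBstep (t w : List Char) (i seg : Nat) (q : Option Char) (parts : List String)
    (hi : i < t.length)
    (hno : ¬ (pvQuoteStep t q i = none ∧ (' ' :: (w ++ [' '])) <+: t.drop i)) :
    pvBloop t w i seg q parts = pvBloop t w (i + 1) seg (pvQuoteStep t q i) parts := by
  by_cases hpre : (' ' :: (w ++ [' '])) <+: t.drop i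
  · have hsp : t.getD i ' ' = ' ' := pvGetD_of_prefix t w i hpre
    have hq : pvQuoteStep t q i = q := pvQuoteStep_of_space t q i hsp
    have hqn : ¬ q = none := by rw [hq] at hno; tauto
    have hfind : PySem.Chars.findFrom t (' ' :: (w ++ [' '])) (i : Int) = (i : Int) :=
      pvFindFrom_eq_of t _ i i (le_of_lt hi) le_rfl hpre (by omega)
    rw [hq]
    conv_lhs => rw [pvBloop]
    simp only [hfind]
    rw [dif_neg (by omega)]
    simp only [Int.toNat_natCast, Nat.sub_self, List.range'_zero, List.foldl_nil]
    rw [if_neg hqn]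
  · have hstep := pvFindFrom_step t (' ' :: (w ++ [' '])) i hi hpre
    conv_lhs => rw [pvBloop]
    conv_rhs => rw [pvBloop]
    simp only [hstep]
    by_cases hj : PySem.Chars.findFrom t (' ' :: (w ++ [' '])) ((i + 1 : Nat) : Int) = -1
    · have hj' : PySem.Chars.findFrom t (' ' :: (w ++ [' '])) ((i:Int) + 1) = -1 := by
        rw [show ((i:Int) + 1) = ((i+1 : Nat) : Int) by push_cast; ring]; exact hj
      simp [hj']
    · rw [dif_neg hj, dif_neg hj]
      obtain ⟨hb1, hb2, hb3⟩ := pvFindFrom_bounds t (' ' :: (w ++ [' '])) (i+1) (by simp) hj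
      have hsplit : (PySem.Chars.findFrom t (' ' :: (w ++ [' '])) ((i + 1 : Nat) : Int)).toNat - i
          = ((PySem.Chars.findFrom t (' ' :: (w ++ [' '])) ((i + 1 : Nat) : Int)).toNat - (i+1)) + 1 := by
        omega
      rw [hsplit, List.range'_succ, List.foldl_cons]

-- past the end both loops emit the final stripped segment
theorem pvBase (t w : List Char) (i seg : Nat) (parts : List String) (q : Option Char)
    (hle : t.length ≤ i) (hsi : seg ≤ i) :
    pvAloop t w i ((t.drop seg).take (i - seg)) parts q = pvBloop t w i seg q parts := by
  have hfind : PySem.Chars.findFrom t (' ' :: (w ++ [' '])) (i : Int) = -1 := by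
    by_cases h : t.length < i
    · exact pvFindFrom_none_of_lt t _ i h
    · have hi : i = t.length := by omega
      subst hi
      rw [PySem.Chars.findFrom_natCast_eq_neg_one_iff t _ _ le_rfl]
      simp
  have htake : (t.drop seg).take (i - seg) = t.drop seg :=
    List.take_of_length_le (by simp; omega)
  conv_lhs => rw [pvAloop]
  conv_rhs => rw [pvBloop]
  have hni : ¬ i < t.length := by omega
  simp only [hni, hfind, dite_false]
  rw [htake]
  simp

-- main invariant: cur is exactly the slice text[seg:i]
theorem pvKey (t w : List Char) (m : Nat) : ∀ i seg cur parts q,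
    t.length + 1 - i ≤ m → seg ≤ i → cur = (t.drop seg).take (i - seg) →
    pvAloop t w i cur parts q = pvBloop t w i seg q parts := by
  induction m with
  | zero =>
    intro i seg cur parts q hm hsi hcur
    rw [hcur]
    exact pvBase t w i seg parts q (by omega) hsi
  | succ n ih =>
    intro i seg cur parts q hm hsi hcur
    by_cases hil : i < t.length
    · by_cases hmatch : pvQuoteStep t q i = none ∧ (' ' :: (w ++ [' '])) <+: t.drop i
      · obtain ⟨hq0, hpre⟩ := hmatch
        have hsp : t.getD i ' ' = ' ' := pvGetD_of_prefix t w i hpre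
        have hqq : pvQuoteStep t q i = q := pvQuoteStep_of_space t q i hsp
        have hqnone : q = none := by rw [← hqq, hq0]
        subst hqnone
        have hwl : i + (' ' :: (w ++ [' '])).length ≤ t.length := by
          have := hpre.length_le
          simp only [List.length_drop] at this
          simp only [List.length_cons, List.length_append] at this ⊢
          omega
        have hfind : PySem.Chars.findFrom t (' ' :: (w ++ [' '])) (i : Int) = (i : Int) :=
          pvFindFrom_eq_of t _ i i (by omega) le_rfl hpre (by omega)
        conv_lhs => rw [pvAloop]
        rw [dif_pos hil, if_pos ⟨hq0, hpre⟩, hq0]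
        conv_rhs => rw [pvBloop]
        simp only [hfind]
        rw [dif_neg (by omega)]
        simp only [Int.toNat_natCast, Nat.sub_self, List.range'_zero, List.foldl_nil, if_true]
        rw [← hcur]
        exact ih _ _ [] _ none (by simp only [List.length_cons, List.length_append] at hwl ⊢; omega)
          le_rfl (by simp)
      · have hcur' : cur ++ [t.getD i ' '] = (t.drop seg).take (i + 1 - seg) := by
          rw [hcur]
          have h1 : i + 1 - seg = (i - seg) + 1 := by omega
          rw [h1, List.take_add_one]
          congr 1
          rw [List.getElem?_drop, show seg + (i - seg) = i by omega,
            List.getElem?_eq_getElem hil]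
          simp [List.getD_eq_getElem?_getD, List.getElem?_eq_getElem hil]
        conv_lhs => rw [pvAloop]
        rw [dif_pos hil, if_neg hmatch]
        rw [ih (i+1) seg _ parts (pvQuoteStep t q i) (by omega) (by omega) hcur']
        exact (pvBstep t w i seg q parts hil hmatch).symm
    · rw [hcur]
      exact pvBase t w i seg parts q (by omega) hsi

-- ===== VERDICT (by name: the statement is the Claim_ definition above) =====
theorem split_by_unescaped_word_py_spec : Claim_equal_split_by_unescaped_word_py := by
  intro text word _
  unfold Spec_split_by_unescaped_word_py split_by_unescaped_word_py split_by_unescaped_word_py_alt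
  exact pvKey text.toList word.toList (text.toList.length + 1) 0 0 [] [] none (by omega)
    (by omega) (by simp)
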